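-- pv_equiv track=rewrite | github.com/AshFrankland/Advent-of-Code-2022 | Day_7_puzzle.py | map_directories
-- ===== SOURCE A (Python) =====
-- def map_directories(dos_cmds):
--     current_dir = []
--     dir_sizes = {}
--     for cmd in dos_cmds:
--         if cmd == '$ cd ..':
--             current_dir.pop()
--         elif '$ cd' in cmd:
--             if not current_dir:
--                 dir_name = cmd.split()[-1]
--             else:
--                 dir_name = current_dir[-1] + cmd.split()[-1]
--             current_dir.append(dir_name)
--             dir_sizes[current_dir[-1]] = 0
--         elif cmd == '$ ls' or 'dir' in cmd:
--             pass
--         else: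
--             for dir in range(len(current_dir)):
--                 dir_sizes[current_dir[dir]] += int(cmd.split()[0])
--     return dir_sizes
-- ===== SOURCE B (Python) =====
-- def map_directories(dos_cmds):
--     # One pass with a size stack: file sizes are added only to the current
--     # directory; a directory's accumulated size flows into its parent once,
--     # when it is left (or at the final flush) - no inner loop over ancestors.
--     stack = []            # [name, size] pairs, innermost last
--     totals = {}
--     for cmd in dos_cmds:
--         if cmd == '$ cd ..':
--             name, size = stack.pop()
--             totals[name] = size
--             if stack:
--                 stack[-1][1] += size
--         elif '$ cd' in cmd:
--             tail = cmd.split()[-1]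
--             name = tail if not stack else stack[-1][0] + tail
--             stack.append([name, 0])
--             totals[name] = 0
--         elif cmd == '$ ls' or 'dir' in cmd:
--             pass
--         elif stack:
--             stack[-1][1] += int(cmd.split()[0])
--     while stack:
--         name, size = stack.pop()
--         totals[name] = size
--         if stack:
--             stack[-1][1] += size
--     return totals
-- ===== Notes on version B (the rewrite author's own statement) =====
-- stated objective: faster
-- what changed: A adds every file's size to all open ancestor directories on each file line (O(files x depth)); B keeps a stack of per-directory accumulated sizes, adds a file only to the current directory, and propagates each directory's total to its parent once when the directory is left (plus one final flush), which is O(n).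
import Mathlib
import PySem

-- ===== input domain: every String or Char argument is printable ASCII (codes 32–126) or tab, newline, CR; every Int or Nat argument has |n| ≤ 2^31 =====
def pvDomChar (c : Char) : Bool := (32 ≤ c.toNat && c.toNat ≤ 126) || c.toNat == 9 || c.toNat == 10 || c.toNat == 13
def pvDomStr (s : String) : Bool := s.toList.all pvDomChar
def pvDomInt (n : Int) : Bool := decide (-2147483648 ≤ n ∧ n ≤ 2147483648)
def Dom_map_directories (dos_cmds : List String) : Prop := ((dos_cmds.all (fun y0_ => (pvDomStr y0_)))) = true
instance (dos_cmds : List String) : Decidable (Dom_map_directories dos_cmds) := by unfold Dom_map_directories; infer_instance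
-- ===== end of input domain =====

-- B replaces A's inner loop over all ancestors per file line by a size stack:
-- a file adds only to the current directory and each directory's total is
-- propagated to its parent once, when it is left (objective: faster on deep trees).
-- ===== PORT A =====
def stepA (st : List String × PySem.Dict String Int) (cmd : String) :
    List String × PySem.Dict String Int :=
  if cmd == "$ cd .." then
    (st.1.dropLast, st.2)                           -- current_dir.pop(); raises on empty → Pre_
  else if PySem.Str.isIn "$ cd" cmd then
    let dirName :=
      if st.1.isEmpty then PySem.List.pyGetD (PySem.Str.split₀ cmd) (-1) ""
      else PySem.List.pyGetD st.1 (-1) "" ++ PySem.List.pyGetD (PySem.Str.split₀ cmd) (-1) ""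
    (st.1 ++ [dirName], st.2.insert dirName 0)
  else if cmd == "$ ls" || PySem.Str.isIn "dir" cmd then
    st
  else
    (st.1, (PySem.List.pyRange 0 (st.1.length : Int) 1).foldl
      (fun d j => d.modify (PySem.List.pyGetD st.1 j "") 0
        (· + (PySem.Int.ofStr? (PySem.List.pyGetD (PySem.Str.split₀ cmd) 0 "")).getD 0)) st.2)
      -- int(cmd.split()[0]) : ValueError/IndexError (when current_dir ≠ []) → Pre_

def map_directories (dos_cmds : List String) : List (String × Int) :=
  (dos_cmds.foldl stepA ([], PySem.Dict.empty)).2.items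

-- ===== PORT B =====
def stepB (st : List (String × Int) × PySem.Dict String Int) (cmd : String) :
    List (String × Int) × PySem.Dict String Int :=
  if cmd == "$ cd .." then
    let top := PySem.List.pyGetD st.1 (-1) ("", 0)  -- stack.pop(); raises on empty → Pre_
    let rest := st.1.dropLast
    let totals := st.2.insert top.1 top.2
    if rest.isEmpty then (rest, totals)
    else
      let par := PySem.List.pyGetD rest (-1) ("", 0)
      (rest.dropLast ++ [(par.1, par.2 + top.2)], totals)
  else if PySem.Str.isIn "$ cd" cmd then
    let tl := PySem.List.pyGetD (PySem.Str.split₀ cmd) (-1) ""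
    let name := if st.1.isEmpty then tl else (PySem.List.pyGetD st.1 (-1) ("", 0)).1 ++ tl
    (st.1 ++ [(name, 0)], st.2.insert name 0)
  else if cmd == "$ ls" || PySem.Str.isIn "dir" cmd then
    st
  else if st.1.isEmpty then
    st
  else
    let n := (PySem.Int.ofStr? (PySem.List.pyGetD (PySem.Str.split₀ cmd) 0 "")).getD 0
    let top := PySem.List.pyGetD st.1 (-1) ("", 0)
    (st.1.dropLast ++ [(top.1, top.2 + n)], st.2)

-- the final 'while stack' flush, on the reversed stack (innermost first)
def flushR : List (String × Int) → PySem.Dict String Int → PySem.Dict String Int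
  | [], t => t
  | (n, s) :: rest, t =>
    match rest with
    | [] => t.insert n s
    | (pn, ps) :: rr => flushR ((pn, ps + s) :: rr) (t.insert n s)
termination_by l _ => l.length
decreasing_by simp

def map_directories_alt (dos_cmds : List String) : List (String × Int) :=
  let fin := dos_cmds.foldl stepB ([], PySem.Dict.empty)
  (flushR fin.1.reverse fin.2).items

-- ===== PRECONDITION & SPEC =====
-- Pre_ excludes exactly the inputs on which A raises: a '$ cd ..' at depth 0
-- (IndexError from current_dir.pop()) and, at positive depth, a file line whose
-- first word is missing or is not an int literal (IndexError/ValueError from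
-- int(cmd.split()[0])).  It is a bracket-balance + parse condition on the input.
def preChk : Int → List String → Bool
  | _, [] => true
  | d, cmd :: rest =>
    if cmd == "$ cd .." then decide (0 < d) && preChk (d - 1) rest
    else if PySem.Str.isIn "$ cd" cmd then preChk (d + 1) rest
    else if cmd == "$ ls" || PySem.Str.isIn "dir" cmd then preChk d rest
    else
      (decide (d = 0) ||
        (match PySem.Str.split₀ cmd with
         | [] => false
         | w :: _ => (PySem.Int.ofStr? w).isSome)) && preChk d rest

def Pre_map_directories (dos_cmds : List String) : Prop := preChk 0 dos_cmds = true
instance (dos_cmds : List String) : Decidable (Pre_map_directories dos_cmds) := by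
  unfold Pre_map_directories; infer_instance

def pvWitness_map_directories : List String :=
  ["$ cd /", "$ ls", "100 a.txt", "$ cd x", "dir y", "200 b.txt", "$ cd ..", "$ cd x"]

def Spec_map_directories (dos_cmds : List String) (out : List (String × Int)) : Prop := out = map_directories_alt dos_cmds
instance (dos_cmds : List String) (out : List (String × Int)) : Decidable (Spec_map_directories dos_cmds out) := by unfold Spec_map_directories; infer_instance

-- ===== CLAIM (what is proved, stated in full; the proofs are below) =====
def Claim_equal_map_directories : Prop := ∀ (dos_cmds : List String), Dom_map_directories dos_cmds → Pre_map_directories dos_cmds → Spec_map_directories dos_cmds (map_directories dos_cmds)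

-- ===== LEMMAS AND PROOFS =====

-- names and size-sum of a B stack
def nms (l : List (String × Int)) : List String := l.map Prod.fst
def sumS (l : List (String × Int)) : Int := (l.map Prod.snd).sum

-- add v to the size of the innermost (last) stack entry
def bumpLast (v : Int) : List (String × Int) → List (String × Int)
  | [] => []
  | [p] => [(p.1, p.2 + v)]
  | p :: q :: r => p :: bumpLast v (q :: r)

-- A's dict as a function of B's state: each open directory's entry is
-- overwritten with the suffix sum of the stack sizes from it inward
def overlay (t : PySem.Dict String Int) : List (String × Int) → PySem.Dict String Int
  | [] => t
  | (n, s) :: rest => overlay (t.insert n (s + sumS rest)) rest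

def StInv (a : List String × PySem.Dict String Int)
    (b : List (String × Int) × PySem.Dict String Int) : Prop :=
  a.1 = nms b.1 ∧
  (∀ p ∈ b.1, b.2.contains p.1 = true) ∧
  ((nms b.1).map (fun s => s.toList.length)).Pairwise (· < ·) ∧
  a.2 = overlay b.2 b.1

lemma bumpLast_concat (v : Int) (l : List (String × Int)) (p : String × Int) :
    bumpLast v (l ++ [p]) = l ++ [(p.1, p.2 + v)] := by
  induction l with
  | nil => rfl
  | cons q r ih =>
    cases r with
    | nil => rfl
    | cons q' r' => simpa [bumpLast] using ih

lemma nms_bumpLast (v : Int) (l : List (String × Int)) : nms (bumpLast v l) = nms l := by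
  induction l with
  | nil => rfl
  | cons q r ih =>
    cases r with
    | nil => rfl
    | cons q' r' => simpa [bumpLast, nms] using congrArg (q.1 :: ·) (by simpa [nms] using ih)

lemma sumS_bumpLast (v : Int) (l : List (String × Int)) (h : l ≠ []) :
    sumS (bumpLast v l) = sumS l + v := by
  induction l with
  | nil => exact absurd rfl h
  | cons q r ih =>
    cases r with
    | nil => simp [bumpLast, sumS]
    | cons q' r' =>
      have := ih (by simp)
      simp [bumpLast, sumS] at this ⊢
      omega

-- two inserts at distinct keys commute when the second key is already present
lemma insert_comm_of_contains {d : PySem.Dict String Int} {n m : String} {v w : Int}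
    (h : d.contains m = true) (hne : n ≠ m) :
    (d.insert n v).insert m w = (d.insert m w).insert n v := by
  by_cases hn : d.contains n = true
  · apply PySem.Dict.ext
    rw [PySem.Dict.items_insert_of_contains _ w (by simp [PySem.Dict.contains_insert, h]),
        PySem.Dict.items_insert_of_contains _ v hn,
        PySem.Dict.items_insert_of_contains _ v (by simp [PySem.Dict.contains_insert, hn]),
        PySem.Dict.items_insert_of_contains _ w h,
        List.map_map, List.map_map]
    apply List.map_congr_left
    intro p _
    by_cases h1 : p.1 = n <;> by_cases h2 : p.1 = m <;>
      simp_all [Function.comp]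
  · apply PySem.Dict.ext
    rw [PySem.Dict.items_insert_of_contains _ w (by simp [PySem.Dict.contains_insert, h]),
        PySem.Dict.items_insert_of_not_contains _ v (by simp [hn]),
        PySem.Dict.items_insert_of_not_contains _ v
          (by simp [PySem.Dict.contains_insert, hn]; simpa [eq_comm] using hne),
        PySem.Dict.items_insert_of_contains _ w h,
        List.map_append]
    simp [hne]

-- pulling an insert at a key absent from the stack out of an overlay
lemma overlay_insert_out (t : PySem.Dict String Int) (l : List (String × Int))
    (n : String) (v : Int)
    (hc : ∀ p ∈ l, t.contains p.1 = true) (hn : n ∉ nms l) :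
    overlay (t.insert n v) l = (overlay t l).insert n v := by
  induction l generalizing t with
  | nil => rfl
  | cons q r ih =>
    obtain ⟨m, u⟩ := q
    simp only [nms, List.map_cons, List.mem_cons] at hn
    push Not at hn
    have hm : t.contains m = true := hc (m, u) (by simp)
    show overlay ((t.insert n v).insert m (u + sumS r)) r = _
    rw [insert_comm_of_contains hm hn.1,
        ih _ (fun p hp => by
          rw [PySem.Dict.contains_insert]
          simp [hc p (List.mem_cons_of_mem _ hp)]) (by simpa [nms] using hn.2)]
    rfl

-- popping the innermost directory: its total flows into its parent
lemma overlay_pop (t : PySem.Dict String Int) (l : List (String × Int)) (n : String) (s : Int)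
    (hc : ∀ p ∈ l, t.contains p.1 = true) (hn : n ∉ nms l) :
    overlay (t.insert n s) (bumpLast s l) = overlay t (l ++ [(n, s)]) := by
  induction l generalizing t with
  | nil => simp [bumpLast, overlay, sumS]
  | cons q r ih =>
    obtain ⟨m, u⟩ := q
    simp only [nms, List.map_cons, List.mem_cons] at hn
    push Not at hn
    have hm : t.contains m = true := hc (m, u) (by simp)
    cases r with
    | nil =>
      show overlay ((t.insert n s).insert m (u + s + sumS ([] : List (String × Int)))) [] =
        overlay t ([(m, u), (n, s)])
      rw [overlay, insert_comm_of_contains hm hn.1]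
      show _ = ((t.insert m (u + sumS [(n, s)])).insert n (s + sumS ([] : List (String × Int))))
      simp [sumS]
    | cons q' r' =>
      show overlay ((t.insert n s).insert m (u + sumS (bumpLast s (q' :: r')))) (bumpLast s (q' :: r')) = _
      rw [sumS_bumpLast _ _ (by simp), insert_comm_of_contains hm hn.1]
      have hc' : ∀ p ∈ q' :: r', (t.insert m (u + (sumS (q' :: r') + s))).contains p.1 = true := by
        intro p hp
        rw [PySem.Dict.contains_insert]
        simp [hc p (List.mem_cons_of_mem _ hp)]
      rw [ih _ hc' (by simpa [nms] using hn.2)]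
      show _ = overlay (t.insert m (u + sumS ((q' :: r') ++ [(n, s)]))) ((q' :: r') ++ [(n, s)])
      have hs : u + (sumS (q' :: r') + s) = u + sumS ((q' :: r') ++ [(n, s)]) := by
        simp [sumS]; ring
      rw [hs]

-- a file line: adding v to the innermost size = A adding v to every open directory
lemma overlay_file (t : PySem.Dict String Int) (l : List (String × Int)) (v : Int)
    (hc : ∀ p ∈ l, t.contains p.1 = true) (hnd : (nms l).Nodup) :
    overlay t (bumpLast v l) =
      (nms l).foldl (fun d name => d.modify name 0 (· + v)) (overlay t l) := by
  induction l generalizing t with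
  | nil => rfl
  | cons q r ih =>
    obtain ⟨m, u⟩ := q
    simp only [nms, List.map_cons, List.nodup_cons] at hnd
    have hm : t.contains m = true := hc (m, u) (by simp)
    have hcr : ∀ p ∈ r, t.contains p.1 = true := fun p hp => hc p (List.mem_cons_of_mem _ hp)
    have hcr' : ∀ (X : Int) p, p ∈ r → (t.insert m X).contains p.1 = true := by
      intro X p hp; rw [PySem.Dict.contains_insert]; simp [hcr p hp]
    have hout : ∀ X : Int, overlay (t.insert m X) r = (overlay t r).insert m X :=
      fun X => overlay_insert_out t r m X hcr (by simpa [nms] using hnd.1)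
    cases r with
    | nil =>
      show overlay (t.insert m (u + v + sumS ([] : List (String × Int)))) [] =
        (overlay (t.insert m (u + sumS ([] : List (String × Int)))) []).modify m 0 (· + v)
      show t.insert m (u + v + 0) = (t.insert m (u + 0)).insert m ((t.insert m (u + 0)).getD m 0 + v)
      rw [PySem.Dict.getD_insert_self, PySem.Dict.insert_insert_self]
      ring_nf
    | cons q' r' =>
      show overlay (t.insert m (u + sumS (bumpLast v (q' :: r')))) (bumpLast v (q' :: r')) = _
      rw [sumS_bumpLast _ _ (by simp)]
      rw [show u + (sumS (q' :: r') + v) = u + sumS (q' :: r') + v by ring]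
      rw [ih _ (hcr' _) hnd.2, hout]
      show _ = (nms (q' :: r')).foldl (fun d name => d.modify name 0 (· + v))
        ((overlay (t.insert m (u + sumS (q' :: r'))) (q' :: r')).modify m 0 (· + v))
      rw [hout]
      congr 1
      show ((overlay t (q' :: r')).insert m (u + sumS (q' :: r') + v)) =
        (((overlay t (q' :: r')).insert m (u + sumS (q' :: r'))).insert m
          (((overlay t (q' :: r')).insert m (u + sumS (q' :: r'))).getD m 0 + v))
      rw [PySem.Dict.getD_insert_self, PySem.Dict.insert_insert_self]

-- entering a new directory
lemma overlay_push (t : PySem.Dict String Int) (l : List (String × Int)) (n : String)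
    (hc : ∀ p ∈ l, t.contains p.1 = true) (hn : n ∉ nms l) :
    overlay (t.insert n 0) (l ++ [(n, 0)]) = (overlay t l).insert n 0 := by
  have key : ∀ (l' : List (String × Int)) (t' : PySem.Dict String Int),
      overlay t' (l' ++ [(n, (0 : Int))]) = (overlay t' l').insert n 0 := by
    intro l'
    induction l' with
    | nil => intro t'; show t'.insert n (0 + sumS ([] : List (String × Int))) = t'.insert n 0; simp [sumS]
    | cons q r ih =>
      intro t'
      obtain ⟨m, u⟩ := q
      show overlay (t'.insert m (u + sumS (r ++ [(n, 0)]))) (r ++ [(n, 0)]) = _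
      rw [show sumS (r ++ [(n, 0)]) = sumS r by simp [sumS], ih]
      rfl
  rw [key, overlay_insert_out t l n 0 hc hn, PySem.Dict.insert_insert_self]

-- the final while-loop flush computes the overlay
lemma flushR_eq (l : List (String × Int)) (t : PySem.Dict String Int)
    (hc : ∀ p ∈ l, t.contains p.1 = true) (hnd : (nms l).Nodup) :
    flushR l.reverse t = overlay t l := by
  have key : ∀ (N : Nat) (l : List (String × Int)) (t : PySem.Dict String Int),
      l.length ≤ N → (∀ p ∈ l, t.contains p.1 = true) → (nms l).Nodup →
      flushR l.reverse t = overlay t l := by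
    intro N
    induction N with
    | zero =>
      intro l t hlen _ _
      have : l = [] := by
        cases l with
        | nil => rfl
        | cons q r => simp at hlen
      rw [this, List.reverse_nil, flushR]
      rfl
    | succ N ih =>
      intro l t hlen hc hnd
      rcases List.eq_nil_or_concat l with rfl | ⟨l', p, rfl⟩
      · rw [List.reverse_nil, flushR]; rfl
      obtain ⟨n, s⟩ := p
      simp only [List.concat_eq_append] at *
      have hnd0 : (nms l' ++ [n]).Nodup := by simpa [nms] using hnd
      have hn : n ∉ nms l' := by
        have := hnd0; simp [List.nodup_append] at this; tauto
      have hndl' : (nms l').Nodup := by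
        have := hnd0; simp [List.nodup_append] at this; tauto
      rcases List.eq_nil_or_concat l' with rfl | ⟨l'', q, rfl⟩
      · show flushR ([(n, s)].reverse) t = overlay t [(n, s)]
        rw [List.reverse_singleton, flushR]
        show t.insert n s = t.insert n (s + sumS ([] : List (String × Int)))
        simp [sumS]
      obtain ⟨m, u⟩ := q
      simp only [List.concat_eq_append] at *
      have hrev : ((l'' ++ [(m, u)]) ++ [(n, s)]).reverse = (n, s) :: (m, u) :: l''.reverse := by
        simp
      rw [hrev, flushR]
      have hrev2 : (m, u + s) :: l''.reverse = (bumpLast s (l'' ++ [(m, u)])).reverse := by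
        rw [bumpLast_concat]; simp
      rw [hrev2]
      have hlen' : (bumpLast s (l'' ++ [(m, u)])).length ≤ N := by
        rw [bumpLast_concat]
        simp at hlen ⊢
        omega
      have hc' : ∀ p ∈ bumpLast s (l'' ++ [(m, u)]), (t.insert n s).contains p.1 = true := by
        rw [bumpLast_concat]
        intro p hp
        rw [PySem.Dict.contains_insert]
        rcases List.mem_append.mp hp with h1 | h1
        · simp [hc p (by simp [h1])]
        · simp at h1
          have := hc (m, u) (by simp)
          simp [h1, this]
      have hnd' : (nms (bumpLast s (l'' ++ [(m, u)]))).Nodup := by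
        rw [nms_bumpLast]; exact hndl'
      rw [ih _ _ hlen' hc' hnd']
      exact overlay_pop t (l'' ++ [(m, u)]) n s (fun p hp => hc p (by simp at hp ⊢; tauto)) hn
  exact key l.length l t le_rfl hc hnd

-- words produced by str.split() are nonempty; a string with a non-space char splits non-emptily
lemma go_all_ne (s : List Char) : ∀ (cur : List Char) (acc : List (List Char)),
    (∀ w ∈ acc, w ≠ []) → ∀ w ∈ PySem.Chars.split₀.go s cur acc, w ≠ [] := by
  induction s with
  | nil =>
    intro cur acc hacc w hw
    rw [PySem.Chars.split₀.go] at hw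
    split at hw
    · exact hacc w (by simpa using hw)
    · simp at hw
      rcases hw with h | h
      · exact hacc w h
      · rename_i hcur
        subst h
        simpa using hcur
  | cons c rest ih =>
    intro cur acc hacc w hw
    rw [PySem.Chars.split₀.go] at hw
    split at hw
    · split at hw
      · exact ih [] acc hacc w hw
      · refine ih [] (cur.reverse :: acc) ?_ w hw
        intro x hx
        rcases List.mem_cons.mp hx with rfl | hx
        · rename_i hcur; simpa using hcur
        · exact hacc x hx
    · exact ih (c :: cur) acc hacc w hw

lemma go_ne_nil (s : List Char) : ∀ (cur : List Char) (acc : List (List Char)),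
    (acc ≠ [] ∨ cur ≠ [] ∨ ∃ c ∈ s, PySem.Chars.isspace c = false) →
    PySem.Chars.split₀.go s cur acc ≠ [] := by
  induction s with
  | nil =>
    intro cur acc h
    rw [PySem.Chars.split₀.go]
    split
    · rename_i hcur
      rcases h with h | h | h
      · simpa using h
      · exact absurd (by simpa using hcur) h
      · simp at h
    · simp
  | cons c rest ih =>
    intro cur acc h
    rw [PySem.Chars.split₀.go]
    split
    · rename_i hsp
      split
      · rename_i hcur
        refine ih [] acc ?_
        rcases h with h | h | h
        · exact Or.inl h
        · exact absurd (by simpa using hcur) h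
        · refine Or.inr (Or.inr ?_)
          obtain ⟨x, hx, hxs⟩ := h
          rcases List.mem_cons.mp hx with rfl | hx
          · rw [hsp] at hxs; simp at hxs
          · exact ⟨x, hx, hxs⟩
      · exact ih [] (cur.reverse :: acc) (Or.inl (by simp))
    · exact ih (c :: cur) acc (Or.inr (Or.inl (by simp)))

lemma tail_ne_empty (cmd : String) (h : PySem.Str.isIn "$ cd" cmd = true) :
    (PySem.List.pyGetD (PySem.Str.split₀ cmd) (-1) "").toList ≠ [] := by
  have hinf : ("$ cd").toList <:+: cmd.toList := (PySem.Str.isIn_iff_infix _ _).mp h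
  have hdol : '$' ∈ cmd.toList := hinf.mem (by decide)
  have hne : PySem.Chars.split₀ cmd.toList ≠ [] :=
    go_ne_nil cmd.toList [] [] (Or.inr (Or.inr ⟨'$', hdol, by decide⟩))
  have hsne : PySem.Str.split₀ cmd ≠ [] := by
    intro hcon
    apply hne
    rw [← PySem.Str.split₀_map_toList, hcon]
    rfl
  rw [PySem.List.pyGetD_neg_one _ _ hsne]
  have hmem : (PySem.Str.split₀ cmd).getLast hsne ∈ PySem.Str.split₀ cmd :=
    List.getLast_mem hsne
  have hmem2 : ((PySem.Str.split₀ cmd).getLast hsne).toList ∈ PySem.Chars.split₀ cmd.toList := by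
    rw [← PySem.Str.split₀_map_toList]
    exact List.mem_map_of_mem hmem
  exact go_all_ne cmd.toList [] [] (by simp) _ hmem2

-- small structural helpers
lemma nms_concat (l : List (String × Int)) (p : String × Int) :
    nms (l ++ [p]) = nms l ++ [p.1] := by simp [nms]

lemma bumpLast_eq_concat (v : Int) (l : List (String × Int)) (q : String × Int)
    (hl : l = l.dropLast ++ [q]) :
    l.dropLast ++ [(q.1, q.2 + v)] = bumpLast v l := by
  conv_rhs => rw [hl]
  rw [bumpLast_concat]

lemma nodup_of_pairwise_len (xs : List String) 
    (h : (xs.map (fun s => s.toList.length)).Pairwise (· < ·)) : xs.Nodup := by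
  have h2 : (xs.map (fun s => s.toList.length)).Nodup := h.imp (fun hlt => Nat.ne_of_lt hlt)
  exact h2.of_map _

lemma le_getLast_of_pairwise (L : List Nat) (h : L.Pairwise (· < ·)) (x : Nat) (hx : x ∈ L)
    (hne : L ≠ []) : x ≤ L.getLast hne := by
  have hsplit : L.dropLast ++ [L.getLast hne] = L := List.dropLast_concat_getLast hne
  rw [← hsplit] at h hx
  rw [List.pairwise_append] at h
  rcases List.mem_append.mp hx with h1 | h1
  · exact Nat.le_of_lt (h.2.2 x h1 _ (by simp))
  · simp at h1; omega

lemma contains_of_mem_nms (b2 : PySem.Dict String Int) (l : List (String × Int))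
    (hc : ∀ p ∈ l, b2.contains p.1 = true) (x : String) (hx : x ∈ nms l) :
    b2.contains x = true := by
  simp only [nms, List.mem_map] at hx
  obtain ⟨q, hq, rfl⟩ := hx
  exact hc q hq

-- the per-prefix invariant is preserved by each command
lemma step_inv (cmd : String) (a : List String × PySem.Dict String Int)
    (b : List (String × Int) × PySem.Dict String Int) (hI : StInv a b)
    (hpre : cmd = "$ cd .." → b.1 ≠ []) :
    StInv (stepA a cmd) (stepB b cmd) := by
  obtain ⟨a1, a2⟩ := a
  obtain ⟨b1, b2⟩ := b
  obtain ⟨ha1, ha2, ha3, ha4⟩ := hI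
  simp only at ha1 ha2 ha3 ha4 hpre
  by_cases h1 : cmd = "$ cd .."
  · -- pop
    have hb : b1 ≠ [] := hpre h1
    rcases List.eq_nil_or_concat b1 with hcon | ⟨l, p, hb1⟩
    · exact absurd hcon hb
    obtain ⟨n, s⟩ := p
    simp only [List.concat_eq_append] at hb1
    subst hb1
    have htop : PySem.List.pyGetD (l ++ [(n, s)]) (-1) ("", 0) = (n, s) := by
      rw [PySem.List.pyGetD_neg_one _ _ hb]
      simp
    have hdrop : (l ++ [(n, s)]).dropLast = l := by simp
    have hn : n ∉ nms l := by
      have hnd := nodup_of_pairwise_len _ ha3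
      rw [nms_concat] at hnd
      simp [List.nodup_append] at hnd
      tauto
    have hcl : ∀ p ∈ l, b2.contains p.1 = true := by
      intro p hp; exact ha2 p (by simp [hp])
    simp only [stepA, stepB, h1, if_pos, BEq.rfl, htop, hdrop]
    by_cases hl : l = []
    · subst hl
      simp only [List.isEmpty_nil, if_true]
      refine ⟨?_, by simp, by simp [nms], ?_⟩
      · rw [ha1, nms_concat]; simp [nms]
      · rw [ha4]
        show overlay b2 ([] ++ [(n, s)]) = overlay (b2.insert n s) []
        show b2.insert n (s + sumS ([] : List (String × Int))) = b2.insert n s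
        simp [sumS]
    · have hle : l.isEmpty = false := by simpa [List.isEmpty_iff] using hl
      simp only [hle, Bool.false_eq_true, if_false]
      have hpar : PySem.List.pyGetD l (-1) ("", 0) = l.getLast hl :=
        PySem.List.pyGetD_neg_one _ _ hl
      have hbump : l.dropLast ++ [((l.getLast hl).1, (l.getLast hl).2 + s)] = bumpLast s l :=
        bumpLast_eq_concat s l _ (List.dropLast_concat_getLast hl).symm
      rw [hpar, hbump]
      refine ⟨?_, ?_, ?_, ?_⟩
      · rw [ha1, nms_concat, nms_bumpLast]; simp
      · intro p hp
        rw [PySem.Dict.contains_insert]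
        have hmem : p.1 ∈ nms (bumpLast s l) := by
          simp only [nms, List.mem_map]; exact ⟨p, hp, rfl⟩
        rw [nms_bumpLast] at hmem
        simp [contains_of_mem_nms b2 l hcl p.1 hmem]
      · rw [nms_bumpLast]
        have := ha3
        rw [nms_concat, List.map_append] at this
        exact (List.pairwise_append.mp this).1
      · rw [ha4, ← overlay_pop b2 l n s hcl hn]
  · by_cases h2 : PySem.Str.isIn "$ cd" cmd = true
    · -- push
      have hbeq : (cmd == "$ cd ..") = false := by simpa using h1
      simp only [stepA, stepB, hbeq, Bool.false_eq_true, if_false, h2, if_true]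
      have htl := tail_ne_empty cmd h2
      set tl := PySem.List.pyGetD (PySem.Str.split₀ cmd) (-1) "" with htl_def
      by_cases hb : b1 = []
      · subst hb
        have ha1' : a1 = [] := by simpa [nms] using ha1
        simp only [ha1', List.isEmpty_nil, if_true]
        refine ⟨by simp [nms], ?_, ?_, ?_⟩
        · intro p hp
          simp at hp
          rw [hp, PySem.Dict.contains_insert]
          simp
        · simp [nms]
        · rw [ha4]
          show (overlay b2 []).insert tl 0 = overlay (b2.insert tl 0) ([] ++ [(tl, 0)])
          rw [overlay_push b2 [] tl (by simp) (by simp [nms])]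
      · have hbe : b1.isEmpty = false := by simpa [List.isEmpty_iff] using hb
        have hae : a1.isEmpty = false := by
          rw [ha1]; simpa [nms, List.isEmpty_iff] using hb
        have hane : a1 ≠ [] := by simpa [List.isEmpty_iff] using hae
        simp only [hbe, hae, Bool.false_eq_true, if_false]
        have hnms_ne : nms b1 ≠ [] := by simpa [nms] using hb
        have hlast : PySem.List.pyGetD a1 (-1) "" = (PySem.List.pyGetD b1 (-1) ("", 0)).1 := by
          rw [PySem.List.pyGetD_neg_one _ _ hane, PySem.List.pyGetD_neg_one _ _ hb]
          rw [show a1.getLast hane = (nms b1).getLast hnms_ne by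
            congr 1]
          exact List.getLast_map hnms_ne
        rw [hlast]
        set nm := (PySem.List.pyGetD b1 (-1) ("", 0)).1 ++ tl with hnm
        have hlast2 : (PySem.List.pyGetD b1 (-1) ("", 0)).1 = (b1.getLast hb).1 := by
          rw [PySem.List.pyGetD_neg_one _ _ hb]
        have hlen_lt : ∀ x ∈ nms b1, x.toList.length < nm.toList.length := by
          intro x hx
          have hgl : (nms b1).getLast hnms_ne = (b1.getLast hb).1 := List.getLast_map hnms_ne
          have hx_le : x.toList.length ≤ ((b1.getLast hb).1).toList.length := by
            have hle := le_getLast_of_pairwise _ ha3 x.toList.length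
              (List.mem_map_of_mem hx) (by simpa [nms] using hb)
            rwa [List.getLast_map (l := nms b1) (f := fun s : String => s.toList.length)
              (by simpa using hnms_ne), hgl] at hle
          have hpos : 0 < tl.toList.length := List.length_pos_iff.mpr htl
          rw [hnm, hlast2, String.toList_append, List.length_append]
          omega
        have hnmem : nm ∉ nms b1 := fun hmem => absurd rfl (Nat.ne_of_lt (hlen_lt nm hmem))
        refine ⟨?_, ?_, ?_, ?_⟩
        · rw [ha1, nms_concat]
        · intro p hp
          rw [PySem.Dict.contains_insert]
          rcases List.mem_append.mp hp with hp1 | hp1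
          · simp [ha2 p hp1]
          · simp at hp1; rw [hp1]; simp
        · rw [nms_concat, List.map_append, List.pairwise_append]
          refine ⟨ha3, by simp, ?_⟩
          intro x hx y hy
          simp at hy
          rw [hy]
          obtain ⟨s', hs', rfl⟩ := List.mem_map.mp hx
          exact hlen_lt s' hs'
        · rw [ha4, ← overlay_push b2 b1 nm ha2 hnmem]
    · by_cases h3 : cmd = "$ ls" ∨ PySem.Str.isIn "dir" cmd = true
      · -- ls / dir: both states unchanged
        have hbeq : (cmd == "$ cd ..") = false := by simpa using h1
        have h2' : PySem.Str.isIn "$ cd" cmd = false := by simpa using h2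
        have h3' : (cmd == "$ ls" || PySem.Str.isIn "dir" cmd) = true := by
          rcases h3 with h | h
          · simp [h]
          · simp only [h, Bool.or_true]
        simp only [stepA, stepB, hbeq, Bool.false_eq_true, if_false, h2', h3', if_true]
        exact ⟨ha1, ha2, ha3, ha4⟩
      · -- file line
        have hbeq : (cmd == "$ cd ..") = false := by simpa using h1
        have h2' : PySem.Str.isIn "$ cd" cmd = false := by simpa using h2
        have h3' : (cmd == "$ ls" || PySem.Str.isIn "dir" cmd) = false := by
          push Not at h3
          have hls : (cmd == "$ ls") = false := by simpa using h3.1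
          have hdir : PySem.Str.isIn "dir" cmd = false := by simpa using h3.2
          rw [hls, hdir]
          rfl
        simp only [stepA, stepB, hbeq, Bool.false_eq_true, if_false, h2', h3',
          Bool.false_eq_true, if_false]
        set v := (PySem.Int.ofStr? (PySem.List.pyGetD (PySem.Str.split₀ cmd) 0 "")).getD 0 with hv
        by_cases hb : b1 = []
        · subst hb
          have ha1' : a1 = [] := by simpa [nms] using ha1
          simp only [List.isEmpty_nil, if_true]
          refine ⟨ha1, ha2, ha3, ?_⟩
          rw [ha1']
          show (PySem.List.pyRange 0 (([] : List String).length : Int) 1).foldl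
            (fun d j => d.modify (PySem.List.pyGetD ([] : List String) j "") 0 (· + v)) a2 =
            overlay b2 []
          rw [show ((([] : List String).length : Int)) = 0 by simp, PySem.List.pyRange_zero]
          simpa using ha4
        · have hbe : b1.isEmpty = false := by simpa [List.isEmpty_iff] using hb
          simp only [hbe, Bool.false_eq_true, if_false]
          have htop : PySem.List.pyGetD b1 (-1) ("", 0) = b1.getLast hb :=
            PySem.List.pyGetD_neg_one _ _ hb
          have hbump : b1.dropLast ++ [((b1.getLast hb).1, (b1.getLast hb).2 + v)] =
              bumpLast v b1 :=
            bumpLast_eq_concat v b1 _ (List.dropLast_concat_getLast hb).symm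
          rw [htop, hbump]
          refine ⟨?_, ?_, ?_, ?_⟩
          · rw [ha1, nms_bumpLast]
          · intro p hp
            have hmem : p.1 ∈ nms (bumpLast v b1) := by
              simp only [nms, List.mem_map]; exact ⟨p, hp, rfl⟩
            rw [nms_bumpLast] at hmem
            exact contains_of_mem_nms b2 b1 ha2 p.1 hmem
          · rw [nms_bumpLast]; exact ha3
          · show (PySem.List.pyRange 0 (a1.length : Int) 1).foldl
              (fun d j => d.modify (PySem.List.pyGetD a1 j "") 0 (· + v)) a2 =
              overlay b2 (bumpLast v b1)
            rw [PySem.List.foldl_pyRange_zero_pyGetD' a1 ""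
              (fun d name => d.modify name 0 (· + v)) a2]
            rw [overlay_file b2 b1 v ha2 (nodup_of_pairwise_len _ ha3), ha1, ha4]

lemma fold_inv (cmds : List String) (a : List String × PySem.Dict String Int)
    (b : List (String × Int) × PySem.Dict String Int) (hI : StInv a b)
    (hpre : preChk (b.1.length : Int) cmds = true) :
    StInv (cmds.foldl stepA a) (cmds.foldl stepB b) := by
  induction cmds generalizing a b with
  | nil => simpa using hI
  | cons cmd rest ih =>
    rw [List.foldl_cons, List.foldl_cons]
    by_cases h1 : cmd = "$ cd .."
    · have hbeq : (cmd == "$ cd ..") = true := by simpa using h1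
      simp only [preChk, hbeq, if_true, Bool.and_eq_true, decide_eq_true_eq] at hpre
      obtain ⟨hpos, hrest⟩ := hpre
      have hb : b.1 ≠ [] := by
        intro hcon
        rw [hcon] at hpos
        simp at hpos
      have hlpos : 1 ≤ b.1.length := List.length_pos_iff.mpr hb
      have hlen : ((stepB b cmd).1.length : Int) = (b.1.length : Int) - 1 := by
        simp only [stepB, hbeq, if_true]
        by_cases hre : b.1.dropLast.isEmpty
        · rw [if_pos hre]
          have hnil : b.1.dropLast = [] := by simpa [List.isEmpty_iff] using hre
          have hlen0 : b.1.length - 1 = 0 := by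
            rw [← List.length_dropLast, hnil]
            rfl
          simp [List.length_dropLast]
          omega
        · rw [if_neg hre]
          have h2 : b.1.dropLast ≠ [] := by simpa [List.isEmpty_iff] using hre
          have h2' : 1 ≤ b.1.dropLast.length := List.length_pos_iff.mpr h2
          rw [List.length_dropLast] at h2'
          simp [List.length_dropLast]
          omega
      exact ih _ _ (step_inv cmd a b hI (fun _ => hb)) (by rw [hlen]; exact hrest)
    · have hbeq : (cmd == "$ cd ..") = false := by simpa using h1
      by_cases h2 : PySem.Str.isIn "$ cd" cmd = true
      · simp only [preChk, hbeq, Bool.false_eq_true, if_false, h2, if_true] at hpre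
        have hlen : ((stepB b cmd).1.length : Int) = (b.1.length : Int) + 1 := by
          simp only [stepB, hbeq, Bool.false_eq_true, if_false, h2, if_true]
          simp
        exact ih _ _ (step_inv cmd a b hI (fun hc => absurd hc h1)) (by rw [hlen]; exact hpre)
      · have h2' : PySem.Str.isIn "$ cd" cmd = false := by simpa using h2
        by_cases h3 : (cmd == "$ ls" || PySem.Str.isIn "dir" cmd) = true
        · simp only [preChk, hbeq, Bool.false_eq_true, if_false, h2', h3, if_true] at hpre
          have hlen : ((stepB b cmd).1.length : Int) = (b.1.length : Int) := by
            simp only [stepB, hbeq, Bool.false_eq_true, if_false, h2', h3, if_true]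
          exact ih _ _ (step_inv cmd a b hI (fun hc => absurd hc h1)) (by rw [hlen]; exact hpre)
        · have h3' : (cmd == "$ ls" || PySem.Str.isIn "dir" cmd) = false := by simpa using h3
          simp only [preChk, hbeq, Bool.false_eq_true, if_false, h2', h3',
            Bool.and_eq_true] at hpre
          obtain ⟨_, hrest⟩ := hpre
          have hlen : ((stepB b cmd).1.length : Int) = (b.1.length : Int) := by
            simp only [stepB, hbeq, Bool.false_eq_true, if_false, h2', h3']
            by_cases hre : b.1.isEmpty
            · rw [if_pos hre]
            · rw [if_neg hre]
              have h4 : b.1 ≠ [] := by simpa [List.isEmpty_iff] using hre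
              have h4' : 1 ≤ b.1.length := List.length_pos_iff.mpr h4
              simp [List.length_dropLast]
              omega
          exact ih _ _ (step_inv cmd a b hI (fun hc => absurd hc h1)) (by rw [hlen]; exact hrest)

-- ===== VERDICT (by name: the statement is the Claim_ definition above) =====
theorem map_directories_spec : Claim_equal_map_directories := by
  intro cmds _hDom hPre
  unfold Spec_map_directories
  have hI0 : StInv ([], PySem.Dict.empty) ([], PySem.Dict.empty) := by
    refine ⟨rfl, by simp, by simp [nms], rfl⟩
  have h := fold_inv cmds ([], PySem.Dict.empty) ([], PySem.Dict.empty) hI0 (by simpa using hPre)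
  obtain ⟨h1, h2, h3, h4⟩ := h
  unfold map_directories map_directories_alt
  have hnd : (nms (cmds.foldl stepB ([], PySem.Dict.empty)).1).Nodup :=
    nodup_of_pairwise_len _ h3
  rw [h4]
  show _ = (flushR _ _).items
  rw [flushR_eq _ _ h2 hnd]
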